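-- pv_equiv track=rewrite | github.com/BruceBerk/advent-code-2017 | advent3_2.py | box_sum
-- ===== SOURCE A (Python) =====
-- def box_sum(box, i, j):
--     """Sum the 8 adjacent squares for a given box location"""
--     accum = 0
--     box_side = len(box)
--
--     row = i - 1
--     while row <= (i+1):
--         col = j - 1
--         while col <= (j+1):
--             if row != i or col != j:
--                 if row >= 0 and row < box_side and col >= 0 and col < box_side:
--                     accum += box[row][col]
--
--             col += 1
--
--         row += 1
--
--     return accum
-- ===== SOURCE B (Python) =====
-- def box_sum(box, i, j):
--     """Sum the 8 adjacent squares for a given box location"""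
--     return sum(v
--                for r, row in enumerate(box)
--                for c, v in enumerate(row)
--                if max(abs(r - i), abs(c - j)) == 1)
-- ===== Notes on version B (the rewrite author's own statement) =====
-- stated objective: alternative
-- what changed: Replaces the 3x3 window walk with per-cell bounds checks by a single whole-grid enumerate scan summing every cell at Chebyshev distance exactly 1 from (i,j), with no bounds arithmetic at all.
-- outside the precondition, e.g. on box_sum([[0, 7]], 0, 0): A returns 0, B returns 7
import Mathlib
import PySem

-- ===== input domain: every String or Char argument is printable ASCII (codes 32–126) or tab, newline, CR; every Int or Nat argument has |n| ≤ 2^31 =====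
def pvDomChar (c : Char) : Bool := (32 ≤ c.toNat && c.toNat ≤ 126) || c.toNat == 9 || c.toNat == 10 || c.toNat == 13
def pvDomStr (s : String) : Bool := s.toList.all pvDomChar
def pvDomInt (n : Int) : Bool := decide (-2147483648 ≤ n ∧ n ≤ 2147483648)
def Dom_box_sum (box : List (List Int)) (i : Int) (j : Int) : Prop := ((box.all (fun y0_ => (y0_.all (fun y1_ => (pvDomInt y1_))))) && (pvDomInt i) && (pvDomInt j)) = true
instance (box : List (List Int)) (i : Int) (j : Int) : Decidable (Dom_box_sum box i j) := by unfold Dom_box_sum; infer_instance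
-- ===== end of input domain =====

-- B replaces A's 3x3 window walk (per-cell bounds and center checks) by one whole-grid
-- enumerate scan summing every cell at Chebyshev distance exactly 1 from (i,j)
-- (objective: alternative algorithm; not faster).

-- box[r][c] as both Pythons read it (default never reached inside Pre_)
def pvCell (box : List (List Int)) (r c : Int) : Int :=
  PySem.List.pyGetD (PySem.List.pyGetD box r []) c 0

-- ===== PORT A =====
-- inner 'while col <= j+1' loop of A
def pvAInner (box : List (List Int)) (bs i j row col acc : Int) : Int :=
  if _h : col ≤ j + 1 then
    pvAInner box bs i j row (col + 1)
      (if row ≠ i ∨ col ≠ j then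
        (if 0 ≤ row ∧ row < bs ∧ 0 ≤ col ∧ col < bs then acc + pvCell box row col else acc)
       else acc)
  else acc
termination_by (j + 2 - col).toNat
decreasing_by omega

-- outer 'while row <= i+1' loop of A
def pvAOuter (box : List (List Int)) (bs i j row acc : Int) : Int :=
  if h : row ≤ i + 1 then
    pvAOuter box bs i j (row + 1) (pvAInner box bs i j row (j - 1) acc)
  else acc
termination_by (i + 2 - row).toNat
decreasing_by omega

def box_sum (box : List (List Int)) (i : Int) (j : Int) : Int :=
  pvAOuter box (box.length : Int) i j (i - 1) 0

-- ===== PORT B =====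
-- the generator-expression sum: fold over enumerate(box), inner fold over enumerate(row);
-- Python's max(abs(r-i),abs(c-j)) == 1 is max of the two natAbs (exact on Int)
def box_sum_alt (box : List (List Int)) (i : Int) (j : Int) : Int :=
  (PySem.List.enumerate box).foldl (fun acc p =>
    (PySem.List.enumerate p.2).foldl (fun a q =>
      if max (p.1 - i).natAbs (q.1 - j).natAbs = 1 then a + q.2 else a) acc) 0

-- ===== PRECONDITION & SPEC =====
-- Pre_ excludes ragged boxes whose row length disagrees with len(box) at some neighbor
-- column of (i,j): there A either raises IndexError or silently ignores existing cells under
-- its square-grid assumption, while B's whole-grid scan counts every existing neighbor.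
def Pre_box_sum (box : List (List Int)) (i : Int) (j : Int) : Prop :=
  ∀ dr ∈ [(-1 : Int), 0, 1], ∀ dc ∈ [(-1 : Int), 0, 1], ¬(dr = 0 ∧ dc = 0) →
    0 ≤ i + dr → i + dr < (box.length : Int) → 0 ≤ j + dc →
      (j + dc < (box.length : Int) ↔ j + dc < ((PySem.List.pyGetD box (i + dr) []).length : Int))
instance (box : List (List Int)) (i : Int) (j : Int) : Decidable (Pre_box_sum box i j) := by
  unfold Pre_box_sum; infer_instance

def pvWitness_box_sum : List (List Int) × Int × Int := ([[1, 2], [3, 4]], 0, 0)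

def Spec_box_sum (box : List (List Int)) (i : Int) (j : Int) (out : Int) : Prop := out = box_sum_alt box i j
instance (box : List (List Int)) (i : Int) (j : Int) (out : Int) : Decidable (Spec_box_sum box i j out) := by
  unfold Spec_box_sum; infer_instance

-- ===== CLAIM (what is proved, stated in full; the proofs are below) =====
def Claim_equal_box_sum : Prop := ∀ (box : List (List Int)) (i : Int) (j : Int), Dom_box_sum box i j → Pre_box_sum box i j → Spec_box_sum box i j (box_sum box i j)

-- ===== LEMMAS AND PROOFS =====

-- ---- A-side closed form ----

-- guarded window term (bounds only)
def pvG (box : List (List Int)) (n r c : Int) : Int :=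
  if 0 ≤ r ∧ r < n ∧ 0 ≤ c ∧ c < n then pvCell box r c else 0

-- A's per-cell term: bounds plus the not-center check
def pvH (box : List (List Int)) (n i j r c : Int) : Int :=
  if (r ≠ i ∨ c ≠ j) ∧ (0 ≤ r ∧ r < n ∧ 0 ≤ c ∧ c < n) then pvCell box r c else 0

lemma pvAInner_step (box : List (List Int)) (bs i j row col acc : Int) (h : col ≤ j + 1) :
    pvAInner box bs i j row col acc =
      pvAInner box bs i j row (col + 1) (acc + pvH box bs i j row col) := by
  rw [pvAInner]
  rw [dif_pos h]
  congr 1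
  unfold pvH
  split_ifs <;> omega

lemma pvAInner_stop (box : List (List Int)) (bs i j row col acc : Int) (h : ¬ col ≤ j + 1) :
    pvAInner box bs i j row col acc = acc := by
  rw [pvAInner, dif_neg h]

lemma pvAInner_closed (box : List (List Int)) (bs i j row acc : Int) :
    pvAInner box bs i j row (j - 1) acc =
      acc + pvH box bs i j row (j - 1) + pvH box bs i j row j + pvH box bs i j row (j + 1) := by
  rw [pvAInner_step box bs i j row (j - 1) acc (by omega)]
  rw [show j - 1 + 1 = j by ring]
  rw [pvAInner_step box bs i j row j _ (by omega)]
  rw [pvAInner_step box bs i j row (j + 1) _ (by omega)]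
  rw [pvAInner_stop box bs i j row (j + 1 + 1) _ (by omega)]

lemma pvAOuter_closed (box : List (List Int)) (bs i j : Int) :
    pvAOuter box bs i j (i - 1) 0 =
      (pvH box bs i j (i - 1) (j - 1) + pvH box bs i j (i - 1) j + pvH box bs i j (i - 1) (j + 1)) +
      (pvH box bs i j i (j - 1) + pvH box bs i j i j + pvH box bs i j i (j + 1)) +
      (pvH box bs i j (i + 1) (j - 1) + pvH box bs i j (i + 1) j + pvH box bs i j (i + 1) (j + 1)) := by
  rw [pvAOuter, dif_pos (by omega : i - 1 ≤ i + 1)]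
  rw [show i - 1 + 1 = i by ring]
  rw [pvAOuter, dif_pos (by omega : i ≤ i + 1)]
  rw [pvAOuter, dif_pos (by omega : i + 1 ≤ i + 1)]
  rw [pvAOuter, dif_neg (by omega : ¬ i + 1 + 1 ≤ i + 1)]
  rw [pvAInner_closed, pvAInner_closed, pvAInner_closed]
  ring

lemma pvH_eq_pvG (box : List (List Int)) (n i j r c : Int) (h : ¬ (r = i ∧ c = j)) :
    pvH box n i j r c = pvG box n r c := by
  unfold pvH pvG
  split_ifs <;> first | rfl | tauto

lemma pvH_center (box : List (List Int)) (n i j : Int) : pvH box n i j i j = 0 := by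
  unfold pvH
  rw [if_neg (by tauto)]

-- ---- B-side closed form ----

-- inner generator sum over one enumerated row
def pvB1 (i j r : Int) (row : List Int) : Int :=
  ((PySem.List.enumerate row).map
    (fun q => if max (r - i).natAbs (q.1 - j).natAbs = 1 then q.2 else 0)).sum

lemma pvAlt_as_sum (box : List (List Int)) (i j : Int) :
    box_sum_alt box i j =
      ((PySem.List.enumerate box).map (fun p => pvB1 i j p.1 p.2)).sum := by
  unfold box_sum_alt
  have hin : (fun (acc : Int) (p : Int × List Int) =>
      (PySem.List.enumerate p.2).foldl (fun a q =>
        if max (p.1 - i).natAbs (q.1 - j).natAbs = 1 then a + q.2 else a) acc) =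
      fun acc p => acc + pvB1 i j p.1 p.2 := by
    funext acc p
    have : (fun (a : Int) (q : Int × Int) =>
        if max (p.1 - i).natAbs (q.1 - j).natAbs = 1 then a + q.2 else a) =
        fun a q => a + (if max (p.1 - i).natAbs (q.1 - j).natAbs = 1 then q.2 else 0) := by
      funext a q
      split_ifs <;> ring
    rw [this, PySem.List.foldl_add]
    rfl
  rw [hin, PySem.List.foldl_add]
  ring

-- a sum over range(0,m) of a function supported on {t-1, t, t+1}
lemma pv_sum_support3 (m t : Int) (f : Int → Int)
    (hf : ∀ c, c ≠ t - 1 → c ≠ t → c ≠ t + 1 → f c = 0) :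
    ((PySem.List.pyRange 0 m 1).map f).sum =
      (if 0 ≤ t - 1 ∧ t - 1 < m then f (t - 1) else 0) +
      (if 0 ≤ t ∧ t < m then f t else 0) +
      (if 0 ≤ t + 1 ∧ t + 1 < m then f (t + 1) else 0) := by
  by_cases hm : 0 ≤ m
  · lift m to ℕ using hm
    induction m with
    | zero =>
        rw [PySem.List.pyRange_one_eq_nil (by omega)]
        rw [if_neg (by omega), if_neg (by omega), if_neg (by omega)]
        simp
    | succ n ih =>
        rw [show ((n + 1 : ℕ) : Int) = (n : Int) + 1 by push_cast; ring]
        rw [PySem.List.pyRange_one_succ_right (by omega)]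
        rw [List.map_append, List.sum_append]
        rw [ih]
        have key : ∀ x : Int,
            (if 0 ≤ x ∧ x < (n : Int) + 1 then f x else 0) =
            (if 0 ≤ x ∧ x < (n : Int) then f x else 0) + (if x = (n : Int) then f x else 0) := by
          intro x
          by_cases hx : x = (n : Int)
          · subst hx
            rw [if_pos (by omega), if_neg (by omega), if_pos rfl]
            ring
          · rw [if_neg hx, if_congr (show (0 ≤ x ∧ x < (n:Int) + 1) ↔ (0 ≤ x ∧ x < (n:Int)) by omega) rfl rfl]
            ring
        rw [key (t - 1), key t, key (t + 1)]
        have corr : (if t - 1 = (n : Int) then f (t - 1) else 0) +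
            (if t = (n : Int) then f t else 0) + (if t + 1 = (n : Int) then f (t + 1) else 0) =
            f (n : Int) := by
          by_cases h1 : t - 1 = (n : Int)
          · rw [if_pos h1, if_neg (by omega), if_neg (by omega), h1]; ring
          · by_cases h2 : t = (n : Int)
            · rw [if_neg h1, if_pos h2, if_neg (by omega), h2]; ring
            · by_cases h3 : t + 1 = (n : Int)
              · rw [if_neg h1, if_neg h2, if_pos h3, h3]; ring
              · rw [if_neg h1, if_neg h2, if_neg h3,
                    hf (n : Int) (by omega) (by omega) (by omega)]
                ring
        simp only [List.map_cons, List.map_nil, List.sum_cons, List.sum_nil]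
        rw [← corr]
        ring
  · rw [PySem.List.pyRange_one_eq_nil (by omega)]
    rw [if_neg (by omega), if_neg (by omega), if_neg (by omega)]
    simp

-- inner sum = guarded terms at columns j-1, j, j+1
lemma pvB1_closed (i j r : Int) (row : List Int) :
    pvB1 i j r row =
      (if 0 ≤ j - 1 ∧ j - 1 < (row.length : Int) then
        (if max (r - i).natAbs 1 = 1 then PySem.List.pyGetD row (j - 1) 0 else 0) else 0) +
      (if 0 ≤ j ∧ j < (row.length : Int) then
        (if max (r - i).natAbs 0 = 1 then PySem.List.pyGetD row j 0 else 0) else 0) +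
      (if 0 ≤ j + 1 ∧ j + 1 < (row.length : Int) then
        (if max (r - i).natAbs 1 = 1 then PySem.List.pyGetD row (j + 1) 0 else 0) else 0) := by
  unfold pvB1
  rw [PySem.List.enumerate_eq_map_pyRange row 0, List.map_map]
  have : ((fun q : Int × Int => if max (r - i).natAbs (q.1 - j).natAbs = 1 then q.2 else 0) ∘
      fun c => (c, PySem.List.pyGetD row c 0)) =
      fun c => if max (r - i).natAbs (c - j).natAbs = 1 then PySem.List.pyGetD row c 0 else 0 := rfl
  rw [this]
  rw [pv_sum_support3 _ j _ (by
    intro c h1 h2 h3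
    rw [if_neg (by omega)])]
  rw [show (j - 1 - j).natAbs = 1 by omega, show (j - j).natAbs = 0 by omega,
      show (j + 1 - j).natAbs = 1 by omega]
  rfl

-- whole-grid sum = guarded row terms at rows i-1, i, i+1
lemma pvAlt_closed (box : List (List Int)) (i j : Int) :
    box_sum_alt box i j =
      (if 0 ≤ i - 1 ∧ i - 1 < (box.length : Int) then
        pvB1 i j (i - 1) (PySem.List.pyGetD box (i - 1) []) else 0) +
      (if 0 ≤ i ∧ i < (box.length : Int) then
        pvB1 i j i (PySem.List.pyGetD box i []) else 0) +
      (if 0 ≤ i + 1 ∧ i + 1 < (box.length : Int) then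
        pvB1 i j (i + 1) (PySem.List.pyGetD box (i + 1) []) else 0) := by
  rw [pvAlt_as_sum]
  rw [PySem.List.enumerate_eq_map_pyRange box [], List.map_map]
  have : ((fun p : Int × List Int => pvB1 i j p.1 p.2) ∘
      fun r => (r, PySem.List.pyGetD box r [])) =
      fun r => pvB1 i j r (PySem.List.pyGetD box r []) := rfl
  rw [this]
  exact pv_sum_support3 _ i _ (by
    intro r h1 h2 h3
    rw [pvB1_closed]
    have hmax1 : ¬ max (r - i).natAbs 1 = 1 := by omega
    have habs : ¬ (r - i).natAbs = 1 := by omega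
    simp [hmax1, habs])

lemma pv_ite_add3 (P : Prop) [Decidable P] (a b c : Int) :
    (if P then a + b + c else 0) = (if P then a else 0) + (if P then b else 0) + (if P then c else 0) := by
  split_ifs <;> ring

lemma pv_ite_add2 (P : Prop) [Decidable P] (a b : Int) :
    (if P then a + b else 0) = (if P then a else 0) + (if P then b else 0) := by
  split_ifs <;> ring

-- one non-center B window term equals pvG, given Pre_'s length agreement for its row
lemma pvB_term_eq_pvG (box : List (List Int)) (i j r c : Int)
    (hrow : 0 ≤ r → r < (box.length : Int) → 0 ≤ c →
      (c < (box.length : Int) ↔ c < ((PySem.List.pyGetD box r []).length : Int))) :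
    (if 0 ≤ r ∧ r < (box.length : Int) then
      (if 0 ≤ c ∧ c < ((PySem.List.pyGetD box r []).length : Int) then
        PySem.List.pyGetD (PySem.List.pyGetD box r []) c 0 else 0) else 0) =
    pvG box (box.length : Int) r c := by
  unfold pvG pvCell
  by_cases hr : 0 ≤ r ∧ r < (box.length : Int)
  · rw [if_pos hr]
    by_cases hc0 : 0 ≤ c
    · have := hrow hr.1 hr.2 hc0
      by_cases hc : c < (box.length : Int)
      · rw [if_pos ⟨hc0, this.mp hc⟩, if_pos ⟨hr.1, hr.2, hc0, hc⟩]
      · rw [if_neg (by tauto), if_neg (by tauto)]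
    · rw [if_neg (by tauto), if_neg (by tauto)]
  · rw [if_neg hr, if_neg (by tauto)]

-- ===== VERDICT (by name: the statements are the Claim_ definitions above) =====
theorem box_sum_spec : Claim_equal_box_sum := by
  intro box i j _ hpre
  unfold Spec_box_sum
  unfold box_sum
  have e1 := pvB_term_eq_pvG box i j (i - 1) (j - 1) (by
    intro h1 h2 h3
    have h := hpre (-1) (by simp) (-1) (by simp) (by omega) (by omega) (by omega) (by omega)
    rw [show i + (-1 : Int) = i - 1 by ring, show j + (-1 : Int) = j - 1 by ring] at h
    exact h)
  have e2 := pvB_term_eq_pvG box i j (i - 1) j (by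
    intro h1 h2 h3
    have h := hpre (-1) (by simp) 0 (by simp) (by omega) (by omega) (by omega) (by omega)
    rw [show i + (-1 : Int) = i - 1 by ring, show j + (0 : Int) = j by ring] at h
    exact h)
  have e3 := pvB_term_eq_pvG box i j (i - 1) (j + 1) (by
    intro h1 h2 h3
    have h := hpre (-1) (by simp) 1 (by simp) (by omega) (by omega) (by omega) (by omega)
    rw [show i + (-1 : Int) = i - 1 by ring] at h
    exact h)
  have e4 := pvB_term_eq_pvG box i j i (j - 1) (by
    intro h1 h2 h3
    have h := hpre 0 (by simp) (-1) (by simp) (by omega) (by omega) (by omega) (by omega)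
    rw [show i + (0 : Int) = i by ring, show j + (-1 : Int) = j - 1 by ring] at h
    exact h)
  have e5 := pvB_term_eq_pvG box i j i (j + 1) (by
    intro h1 h2 h3
    have h := hpre 0 (by simp) 1 (by simp) (by omega) (by omega) (by omega) (by omega)
    rw [show i + (0 : Int) = i by ring] at h
    exact h)
  have e6 := pvB_term_eq_pvG box i j (i + 1) (j - 1) (by
    intro h1 h2 h3
    have h := hpre 1 (by simp) (-1) (by simp) (by omega) (by omega) (by omega) (by omega)
    rw [show j + (-1 : Int) = j - 1 by ring] at h
    exact h)
  have e7 := pvB_term_eq_pvG box i j (i + 1) j (by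
    intro h1 h2 h3
    have h := hpre 1 (by simp) 0 (by simp) (by omega) (by omega) (by omega) (by omega)
    rw [show j + (0 : Int) = j by ring] at h
    exact h)
  have e8 := pvB_term_eq_pvG box i j (i + 1) (j + 1) (by
    intro h1 h2 h3
    exact hpre 1 (by simp) 1 (by simp) (by omega) (by omega) (by omega) (by omega))
  rw [pvAOuter_closed, pvAlt_closed]
  rw [pvB1_closed, pvB1_closed, pvB1_closed]
  rw [show ((i - 1 - i).natAbs) = 1 by omega, show ((i - i).natAbs) = 0 by omega,
      show ((i + 1 - i).natAbs) = 1 by omega]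
  simp only [show max 1 1 = 1 from rfl, show max 1 0 = 1 from rfl, show max 0 1 = 1 from rfl,
    show (max 0 0 = 1) = False by simp, if_true, if_false, ite_self, add_zero]
  rw [pv_ite_add3, pv_ite_add2, pv_ite_add3]
  rw [e1, e2, e3, e4, e5, e6, e7, e8]
  rw [pvH_center]
  rw [pvH_eq_pvG _ _ _ _ _ _ (by omega), pvH_eq_pvG _ _ _ _ _ _ (by omega),
      pvH_eq_pvG _ _ _ _ _ _ (by omega), pvH_eq_pvG _ _ _ _ _ _ (by omega),
      pvH_eq_pvG _ _ _ _ _ _ (by omega), pvH_eq_pvG _ _ _ _ _ _ (by omega),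
      pvH_eq_pvG _ _ _ _ _ _ (by omega), pvH_eq_pvG _ _ _ _ _ _ (by omega)]
  ring
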